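-- pv_equiv track=rewrite | github.com/Xiuyuan7/Python-Code-Run-Test | 面经题测试/Seven Eight Capital OA/transforming_strings.py | transforming_strings
-- ===== SOURCE A (Python) =====
-- def transforming_strings(string):
--     # Use a stack to check adjacent characters
--     stack = []
--
--     for char in string:
--         # Append current character to the stack if the stack is empty
--         if not stack:
--             stack.append(char)
--             continue
--
--         # Pop the top character if adjacent pair exists
--         if char == "A" and stack[-1] == "B" or char == "B" and stack[-1] == "A" \
--                 or char == "X" and stack[-1] == "Y" or char == "Y" and stack[-1] == "X":
--             stack.pop()
--         # Otherwise, append current character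
--         else:
--             stack.append(char)
--
--     return "".join(stack)
-- ===== SOURCE B (Python) =====
-- def transforming_strings(string):
--     # Repeatedly delete the complementary pairs until the string stops changing.
--     prev = None
--     while string != prev:
--         prev = string
--         for pair in ("AB", "BA", "XY", "YX"):
--             string = string.replace(pair, "")
--     return string
-- ===== Notes on version B (the rewrite author's own statement) =====
-- stated objective: simpler
-- what changed: Replaced the one-pass stack with a fixpoint loop that repeatedly deletes the four two-letter substrings via str.replace until the string stops changing (the cancellation system is confluent, so both reach the same reduced form); the C-level str.replace passes also make it measurably faster than A's per-character Python loop despite the worst-case extra passes.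
import Mathlib
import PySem

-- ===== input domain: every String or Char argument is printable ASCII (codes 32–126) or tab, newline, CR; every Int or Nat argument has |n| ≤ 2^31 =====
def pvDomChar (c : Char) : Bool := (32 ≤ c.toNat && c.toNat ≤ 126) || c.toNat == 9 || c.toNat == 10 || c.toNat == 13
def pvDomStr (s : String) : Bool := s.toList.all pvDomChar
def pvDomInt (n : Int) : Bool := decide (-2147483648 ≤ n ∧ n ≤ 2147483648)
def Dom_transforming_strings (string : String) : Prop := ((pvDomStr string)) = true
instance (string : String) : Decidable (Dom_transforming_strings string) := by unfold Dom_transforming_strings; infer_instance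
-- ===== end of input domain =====

-- B replaces A's one-pass stack by a fixpoint loop of str.replace deletions of 'AB','BA','XY','YX' (simpler; same reduced form since the pair-cancellation system is confluent).

-- ===== PORT A =====
-- A's condition "char==A and stack[-1]==B or ..." (a new char cancels the top of the stack)
def pvCancels (c top : Char) : Bool :=
  (c == 'A' && top == 'B') || (c == 'B' && top == 'A') ||
  (c == 'X' && top == 'Y') || (c == 'Y' && top == 'X')

-- one iteration of A's for-loop; the stack is kept TOP-FIRST (Python's stack reversed),
-- so append = cons, stack[-1] = head, pop = tail
def pvPush (st : List Char) (c : Char) : List Char :=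
  match st with
  | [] => [c]                                   -- "if not stack: append; continue"
  | top :: rest => if pvCancels c top then rest else c :: top :: rest

-- "".join(stack) with the top-first stack = reverse then pack
def transforming_strings (string : String) : String :=
  String.mk ((string.toList.foldl pvPush []).reverse)

-- ===== PORT B =====
-- helper used only to justify termination of B's while-loop (and by the proofs below):
-- pvRmAll2 a b l = l with every (left-to-right, non-overlapping) occurrence of [a,b] deleted,
-- i.e. Python's l.replace(a+b, "")
def pvRmAll2 (a b : Char) : List Char → List Char
  | [] => []
  | [c] => [c]
  | c :: d :: t => if c = a ∧ d = b then pvRmAll2 a b t else c :: pvRmAll2 a b (d :: t)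
termination_by l => l.length

theorem pvRmAll2_length_le (a b : Char) (l : List Char) :
    (pvRmAll2 a b l).length ≤ l.length := by
  induction l using pvRmAll2.induct a b with
  | case1 => simp [pvRmAll2]
  | case2 c => simp [pvRmAll2]
  | case3 c d t h ih => simp only [pvRmAll2, if_pos h]; simp at ih ⊢; omega
  | case4 c d t h ih => simp only [pvRmAll2, if_neg h]; simp at ih ⊢; omega

theorem pvRmAll2_eq_or_lt (a b : Char) (l : List Char) :
    pvRmAll2 a b l = l ∨ (pvRmAll2 a b l).length < l.length := by
  induction l using pvRmAll2.induct a b with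
  | case1 => left; simp [pvRmAll2]
  | case2 c => left; simp [pvRmAll2]
  | case3 c d t h ih =>
    right
    have := pvRmAll2_length_le a b t
    simp only [pvRmAll2, if_pos h]
    simp; omega
  | case4 c d t h ih =>
    simp only [pvRmAll2, if_neg h]
    rcases ih with ih | ih
    · left; rw [ih]
    · right; simp at ih ⊢; omega

-- the fuel recursion of PySem's replace, characterised
theorem pvGo_eq (a b : Char) : ∀ (fuel : Nat) (l acc : List Char), l.length ≤ fuel →
    PySem.Chars.replace.go [a, b] [] fuel l acc = acc.reverse ++ pvRmAll2 a b l := by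
  intro fuel
  induction fuel with
  | zero =>
    intro l acc h
    have : l = [] := by cases l <;> simp_all
    subst this
    simp [PySem.Chars.replace.go, pvRmAll2]
  | succ n ih =>
    intro l acc h
    match l with
    | [] => simp [PySem.Chars.replace.go, pvRmAll2]
    | [c] =>
      have hp : List.isPrefixOf [a, b] [c] = false := by
        simp [List.isPrefixOf]
      simp only [PySem.Chars.replace.go, hp, Bool.false_eq_true]
      rw [ih [] (c :: acc) (by simp)]
      simp [pvRmAll2]
    | c :: d :: t =>
      by_cases hcd : c = a ∧ d = b
      · obtain ⟨h1, h2⟩ := hcd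
        subst h1; subst h2
        have hp : List.isPrefixOf [c, d] (c :: d :: t) = true := by
          simp [List.isPrefixOf]
        simp only [PySem.Chars.replace.go, hp, if_pos, List.reverse_nil, List.nil_append,
          List.length_cons, List.length_nil, List.drop_succ_cons, List.drop_zero]
        rw [ih t acc (by simp at h ⊢; omega)]
        simp [pvRmAll2]
      · have hp : List.isPrefixOf [a, b] (c :: d :: t) = false := by
          simp only [List.isPrefixOf, Bool.and_eq_false_iff, beq_eq_false_iff_ne, ne_eq,
            Bool.and_true]
          by_cases hac : a = c
          · subst hac; right; intro hbd; exact hcd ⟨rfl, hbd.symm⟩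
          · left; exact hac
        simp only [PySem.Chars.replace.go, hp, Bool.false_eq_true]
        rw [ih (d :: t) (c :: acc) (by simp at h ⊢; omega)]
        simp [pvRmAll2, if_neg hcd]

-- PySem's replace with an empty replacement IS pvRmAll2 (bridge used by the port's termination)
theorem pvReplace_eq_rmAll2 (a b : Char) (l : List Char) :
    PySem.Chars.replace l [a, b] [] = pvRmAll2 a b l := by
  rw [PySem.Chars.replace]
  simp
  exact pvGo_eq a b l.length l [] le_rfl

-- the body of one pass of Source B's for-loop: the four chained str.replace calls
def pvStepB (l : List Char) : List Char :=
  PySem.Chars.replace (PySem.Chars.replace (PySem.Chars.replace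
    (PySem.Chars.replace l ['A', 'B'] []) ['B', 'A'] []) ['X', 'Y'] []) ['Y', 'X'] []

theorem pvStepB_eq (l : List Char) :
    pvStepB l = pvRmAll2 'Y' 'X' (pvRmAll2 'X' 'Y' (pvRmAll2 'B' 'A' (pvRmAll2 'A' 'B' l))) := by
  simp [pvStepB, pvReplace_eq_rmAll2]

theorem pvStepB_length_lt (l : List Char) (h : pvStepB l ≠ l) :
    (pvStepB l).length < l.length := by
  rw [pvStepB_eq] at h ⊢
  rcases pvRmAll2_eq_or_lt 'A' 'B' l with h1 | h1 <;>
    rcases pvRmAll2_eq_or_lt 'B' 'A' (pvRmAll2 'A' 'B' l) with h2 | h2 <;>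
    rcases pvRmAll2_eq_or_lt 'X' 'Y' (pvRmAll2 'B' 'A' (pvRmAll2 'A' 'B' l)) with h3 | h3 <;>
    rcases pvRmAll2_eq_or_lt 'Y' 'X' (pvRmAll2 'X' 'Y' (pvRmAll2 'B' 'A' (pvRmAll2 'A' 'B' l))) with h4 | h4 <;>
    have l1 := pvRmAll2_length_le 'A' 'B' l <;>
    have l2 := pvRmAll2_length_le 'B' 'A' (pvRmAll2 'A' 'B' l) <;>
    have l3 := pvRmAll2_length_le 'X' 'Y' (pvRmAll2 'B' 'A' (pvRmAll2 'A' 'B' l)) <;>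
    have l4 := pvRmAll2_length_le 'Y' 'X' (pvRmAll2 'X' 'Y' (pvRmAll2 'B' 'A' (pvRmAll2 'A' 'B' l))) <;>
    first
      | (exfalso; apply h; rw [h4, h3, h2, h1])
      | omega

-- Source B's while-loop: repeat the four replaces until the string stops changing
def pvLoopB (l : List Char) : List Char :=
  let l' := pvStepB l
  if l' = l then l else pvLoopB l'
termination_by l.length
decreasing_by exact pvStepB_length_lt l (by assumption)

def transforming_strings_alt (string : String) : String :=
  String.mk (pvLoopB string.toList)

-- ===== PRECONDITION & SPEC =====
def Spec_transforming_strings (string : String) (out : String) : Prop := out = transforming_strings_alt string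
instance (string : String) (out : String) : Decidable (Spec_transforming_strings string out) := by unfold Spec_transforming_strings; infer_instance

-- ===== CLAIM (what is proved, stated in full; the proofs are below) =====
def Claim_equal_transforming_strings : Prop := ∀ (string : String), Dom_transforming_strings string → Spec_transforming_strings string (transforming_strings string)

-- ===== LEMMAS AND PROOFS =====

-- a reduced stack (top-first): no two adjacent entries cancel
def pvRedStack (st : List Char) : Prop := List.IsChain (fun x y => pvCancels x y = false) st

-- a reduced string (in string order; the later char is the pvCancels first argument)
def pvRedStr (l : List Char) : Prop := List.IsChain (fun x y => pvCancels y x = false) l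

theorem pvCancels_iff (x y : Char) :
    pvCancels x y = true ↔ (x = 'A' ∧ y = 'B') ∨ (x = 'B' ∧ y = 'A') ∨ (x = 'X' ∧ y = 'Y') ∨ (x = 'Y' ∧ y = 'X') := by
  simp [pvCancels]
  tauto

theorem pvPartner {a b t : Char} (h1 : pvCancels b a = true) (h2 : pvCancels a t = true) : t = b := by
  rw [pvCancels_iff] at h1 h2
  rcases h1 with ⟨hb, ha⟩ | ⟨hb, ha⟩ | ⟨hb, ha⟩ | ⟨hb, ha⟩ <;> subst ha <;> subst hb <;>
    simp_all

theorem pvRedStack_nil : pvRedStack [] := List.IsChain.nil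

theorem pvPush_red {st : List Char} (c : Char) (h : pvRedStack st) : pvRedStack (pvPush st c) := by
  unfold pvRedStack pvPush
  match st with
  | [] => exact List.isChain_singleton ..
  | top :: rest =>
    by_cases hc : pvCancels c top = true
    · simp only [hc, if_true]
      exact h.tail
    · simp only [hc, Bool.false_eq_true, if_false]
      exact List.isChain_cons_cons.mpr ⟨by simpa using hc, h⟩

theorem pvPush2 {a b : Char} {st : List Char} (hba : pvCancels b a = true) (hst : pvRedStack st) :
    pvPush (pvPush st a) b = st := by
  match st with
  | [] => simp [pvPush, hba]
  | t0 :: ts =>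
    by_cases h0 : pvCancels a t0 = true
    · have hb : t0 = b := pvPartner hba h0
      subst hb
      match ts with
      | [] => simp [pvPush, h0]
      | t1 :: ts' =>
        have h1 : pvCancels t0 t1 = false := (List.isChain_cons_cons.mp hst).1
        simp [pvPush, h0, h1]
    · simp [pvPush, h0, hba]

theorem pvStack_rmAll2 (a b : Char) (hba : pvCancels b a = true) :
    ∀ (l st : List Char), pvRedStack st →
      (pvRmAll2 a b l).foldl pvPush st = l.foldl pvPush st := by
  intro l
  induction l using pvRmAll2.induct a b with
  | case1 => intro st _; simp [pvRmAll2]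
  | case2 c => intro st _; simp [pvRmAll2]
  | case3 c d t h ih =>
    intro st hst
    obtain ⟨hc, hd⟩ := h
    have hdc : pvCancels d c = true := by rw [hc, hd]; exact hba
    simp only [pvRmAll2, if_pos (show c = a ∧ d = b from ⟨hc, hd⟩), List.foldl_cons]
    rw [ih st hst, pvPush2 hdc hst]
  | case4 c d t h ih =>
    intro st hst
    simp only [pvRmAll2, if_neg h, List.foldl_cons]
    exact ih (pvPush st c) (pvPush_red c hst)

theorem pvInfix_lt (a b : Char) (l : List Char) (h : [a, b] <:+: l) :
    (pvRmAll2 a b l).length < l.length := by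
  induction l using pvRmAll2.induct a b with
  | case1 => simp at h
  | case2 c =>
    have := h.length_le
    simp at this
  | case3 c d t hcd ih =>
    have := pvRmAll2_length_le a b t
    simp only [pvRmAll2, if_pos hcd]
    simp; omega
  | case4 c d t hcd ih =>
    have h' : [a, b] <:+: (d :: t) := by
      rcases List.infix_cons_iff.mp h with hpre | hinf
      · exfalso
        obtain ⟨hac, h2⟩ := List.cons_prefix_cons.mp hpre
        obtain ⟨hbd, _⟩ := List.cons_prefix_cons.mp h2
        exact hcd ⟨hac.symm, hbd.symm⟩
      · exact hinf
    have := ih h'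
    simp only [pvRmAll2, if_neg hcd]
    simp at this ⊢; omega

theorem pvChain_of_noPairs (l : List Char)
    (h : ∀ x y, [x, y] <:+: l → pvCancels y x = false) : pvRedStr l := by
  unfold pvRedStr
  induction l with
  | nil => exact List.IsChain.nil
  | cons c t ih =>
    rw [List.isChain_cons]
    constructor
    · intro y hy
      cases t with
      | nil => simp at hy
      | cons d t' =>
        simp at hy
        rw [← hy]
        exact h c d (List.IsPrefix.isInfix ⟨t', rfl⟩)
    · exact ih (fun x y hxy => h x y (hxy.trans (t.suffix_cons c).isInfix))

theorem pvStack_of_red : ∀ (l st : List Char), pvRedStr l →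
    (∀ s0 c0, st.head? = some s0 → l.head? = some c0 → pvCancels c0 s0 = false) →
    l.foldl pvPush st = l.reverse ++ st := by
  intro l
  induction l with
  | nil => intro st _ _; simp
  | cons c t ih =>
    intro st hred hhead
    have step : pvPush st c = c :: st := by
      match st with
      | [] => rfl
      | s0 :: ss => simp [pvPush, hhead s0 c rfl rfl]
    rw [List.foldl_cons, step]
    rw [ih (c :: st) hred.tail
      (fun s0 c0 hs hc => by
        simp at hs; subst hs
        exact (List.isChain_cons.mp hred).1 c0 hc)]
    simp

theorem pvLoopB_spec (l : List Char) :
    pvStepB (pvLoopB l) = pvLoopB l ∧ (pvLoopB l).foldl pvPush [] = l.foldl pvPush [] := by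
  have hstep : ∀ m : List Char, (pvStepB m).foldl pvPush [] = m.foldl pvPush [] := by
    intro m
    rw [pvStepB_eq,
      pvStack_rmAll2 'Y' 'X' (by decide) _ [] pvRedStack_nil,
      pvStack_rmAll2 'X' 'Y' (by decide) _ [] pvRedStack_nil,
      pvStack_rmAll2 'B' 'A' (by decide) _ [] pvRedStack_nil,
      pvStack_rmAll2 'A' 'B' (by decide) _ [] pvRedStack_nil]
  induction l using pvLoopB.induct with
  | case1 l l' hfix =>
    have hfix' : pvStepB l = l := hfix
    have hl : pvLoopB l = l := by rw [pvLoopB]; simp [hfix']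
    rw [hl]
    exact ⟨hfix', rfl⟩
  | case2 l l' hfix ih =>
    have hfix' : ¬ pvStepB l = l := hfix
    have hl : pvLoopB l = pvLoopB (pvStepB l) := by rw [pvLoopB]; simp [hfix']
    rw [hl]
    exact ⟨ih.1, by rw [ih.2, hstep l]⟩

theorem pvFix_red (r : List Char) (h : pvStepB r = r) : pvRedStr r := by
  have hlen : (pvStepB r).length = r.length := by rw [h]
  rw [pvStepB_eq] at h hlen
  have e1 : pvRmAll2 'A' 'B' r = r := by
    rcases pvRmAll2_eq_or_lt 'A' 'B' r with e | e
    · exact e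
    · exfalso
      have h2 := pvRmAll2_length_le 'B' 'A' (pvRmAll2 'A' 'B' r)
      have h3 := pvRmAll2_length_le 'X' 'Y' (pvRmAll2 'B' 'A' (pvRmAll2 'A' 'B' r))
      have h4 := pvRmAll2_length_le 'Y' 'X' (pvRmAll2 'X' 'Y' (pvRmAll2 'B' 'A' (pvRmAll2 'A' 'B' r)))
      omega
  rw [e1] at h hlen
  have e2 : pvRmAll2 'B' 'A' r = r := by
    rcases pvRmAll2_eq_or_lt 'B' 'A' r with e | e
    · exact e
    · exfalso
      have h3 := pvRmAll2_length_le 'X' 'Y' (pvRmAll2 'B' 'A' r)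
      have h4 := pvRmAll2_length_le 'Y' 'X' (pvRmAll2 'X' 'Y' (pvRmAll2 'B' 'A' r))
      omega
  rw [e2] at h hlen
  have e3 : pvRmAll2 'X' 'Y' r = r := by
    rcases pvRmAll2_eq_or_lt 'X' 'Y' r with e | e
    · exact e
    · exfalso
      have h4 := pvRmAll2_length_le 'Y' 'X' (pvRmAll2 'X' 'Y' r)
      omega
  rw [e3] at h hlen
  have e4 : pvRmAll2 'Y' 'X' r = r := h
  apply pvChain_of_noPairs
  intro x y hinf
  by_contra hc
  rw [Bool.not_eq_false] at hc
  rcases (pvCancels_iff y x).mp hc with ⟨hy, hx⟩ | ⟨hy, hx⟩ | ⟨hy, hx⟩ | ⟨hy, hx⟩ <;>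
    subst hy <;> subst hx
  · have := pvInfix_lt 'B' 'A' r hinf
    rw [e2] at this; omega
  · have := pvInfix_lt 'A' 'B' r hinf
    rw [e1] at this; omega
  · have := pvInfix_lt 'Y' 'X' r hinf
    rw [e4] at this; omega
  · have := pvInfix_lt 'X' 'Y' r hinf
    rw [e3] at this; omega

-- ===== VERDICT (by name: the statement is the Claim_ definition above) =====
theorem transforming_strings_spec : Claim_equal_transforming_strings := by
  intro s _
  unfold Spec_transforming_strings transforming_strings transforming_strings_alt
  obtain ⟨hfix, hstack⟩ := pvLoopB_spec s.toList
  have hred := pvFix_red _ hfix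
  have hr : (pvLoopB s.toList).foldl pvPush [] = (pvLoopB s.toList).reverse ++ [] :=
    pvStack_of_red _ _ hred (by intro s0 c0 h0 _; simp at h0)
  rw [← hstack, hr]
  simp
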